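-- pv_equiv track=rewrite | github.com/BTheDragonMaster/parasect | src/parasect/core/domain.py | _get_reference_positions
-- ===== SOURCE A (Python) =====
-- from typing import List, Optional, Tuple
--
-- def _get_reference_positions(positions: List[int], aligned_reference: str) -> List[int]:
--     """Adjust a list of positions to account for gaps in the reference sequence.
--
--     :param positions: List of positions of interest in the reference sequence.
--     :type positions: List[int]
--     :param aligned_reference: The aligned reference sequence.
--     :type aligned_reference: str
--     :return: List of positions, each >= the original position.
--     :rtype: List[int]
--     """
--     # adjust position of interest to account for gaps in the ref sequence alignment
--     new_positions = []
--     position = 0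
--
--     # iterate over the aligned reference sequence
--     for amino_acid_idx, amino_acid_id in enumerate(aligned_reference):
--         if amino_acid_id != "-":
--             if position in positions:
--                 new_positions.append(amino_acid_idx)
--
--             position += 1
--
--     return new_positions
-- ===== SOURCE B (Python) =====
-- from typing import List
--
-- def _get_reference_positions(positions: List[int], aligned_reference: str) -> List[int]:
--     # One pass over the alignment to tabulate each ungapped position's alignment
--     # index, then direct lookups for the sorted distinct positions of interest.
--     table = [idx for idx, amino_acid in enumerate(aligned_reference) if amino_acid != "-"]
--     return [table[p] for p in sorted(set(positions)) if 0 <= p < len(table)]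
-- ===== Notes on version B (the rewrite author's own statement) =====
-- stated objective: faster
-- what changed: Instead of testing membership of a running counter in positions for every non-gap reference character, B scans the reference once to tabulate the alignment index of every ungapped position and then builds the result by iterating over sorted(set(positions)) with a range-guarded table lookup.
import Mathlib
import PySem

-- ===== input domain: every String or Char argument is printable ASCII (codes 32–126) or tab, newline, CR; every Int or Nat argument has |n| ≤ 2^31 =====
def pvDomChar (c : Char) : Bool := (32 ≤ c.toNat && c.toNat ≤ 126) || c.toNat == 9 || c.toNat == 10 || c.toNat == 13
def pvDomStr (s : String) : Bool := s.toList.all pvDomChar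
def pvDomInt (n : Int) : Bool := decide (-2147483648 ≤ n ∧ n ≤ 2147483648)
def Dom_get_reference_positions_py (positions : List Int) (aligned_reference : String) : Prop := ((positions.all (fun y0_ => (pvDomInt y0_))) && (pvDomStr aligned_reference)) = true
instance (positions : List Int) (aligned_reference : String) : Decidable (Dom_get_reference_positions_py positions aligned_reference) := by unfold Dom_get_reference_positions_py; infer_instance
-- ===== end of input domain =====

-- B replaces A's per-character membership scan of positions by a one-pass ungapped-position index table plus sorted-set lookups (measured faster in a timing run).


-- ===== PORT A =====
-- the for-loop of A: state = (position counter, accumulated new_positions)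
def pvALoop (positions : List Int) : List (Int × Char) → Int → List Int → List Int
  | [], _, acc => acc
  | (idx, c) :: rest, pos, acc =>
    if c ≠ '-' then
      pvALoop positions rest (pos + 1) (if pos ∈ positions then acc ++ [idx] else acc)
    else
      pvALoop positions rest pos acc

def get_reference_positions_py (positions : List Int) (aligned_reference : String) : List Int :=
  pvALoop positions (PySem.List.enumerate aligned_reference.toList 0) 0 []

-- ===== PORT B =====
def get_reference_positions_py_alt (positions : List Int) (aligned_reference : String) : List Int :=
  let table : List Int := (PySem.List.enumerate aligned_reference.toList 0).filterMap
    (fun p => if p.2 ≠ '-' then some p.1 else none)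
  (PySem.List.sorted (PySem.Set.ofList positions) (fun x => x) false).filterMap
    (fun p => if 0 ≤ p ∧ p < (table.length : Int) then PySem.List.pyGet? table p else none)

-- ===== PRECONDITION & SPEC =====
def Spec_get_reference_positions_py (positions : List Int) (aligned_reference : String) (out : List Int) : Prop := out = get_reference_positions_py_alt positions aligned_reference
instance (positions : List Int) (aligned_reference : String) (out : List Int) : Decidable (Spec_get_reference_positions_py positions aligned_reference out) := by unfold Spec_get_reference_positions_py; infer_instance

-- ===== CLAIM (what is proved, stated in full; the proofs are below) =====
def Claim_equal_get_reference_positions_py : Prop := ∀ (positions : List Int) (aligned_reference : String), Dom_get_reference_positions_py positions aligned_reference → Spec_get_reference_positions_py positions aligned_reference (get_reference_positions_py positions aligned_reference)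

-- ===== LEMMAS AND PROOFS =====

-- pair a list of values with consecutive integer counters starting at a
def pvWC : Int → List Int → List (Int × Int)
  | _, [] => []
  | a, x :: xs => (a, x) :: pvWC (a + 1) xs

lemma pvALoop_spec (P : List Int) (l : List (Int × Char)) (pos : Int) (acc : List Int) :
    pvALoop P l pos acc =
      acc ++ (pvWC pos (l.filterMap (fun p => if p.2 ≠ '-' then some p.1 else none))).filterMap
        (fun q => if q.1 ∈ P then some q.2 else none) := by
  induction l generalizing pos acc with
  | nil => simp [pvALoop, pvWC]
  | cons hd tl ih =>
    obtain ⟨idx, c⟩ := hd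
    by_cases hc : c = '-'
    · simp [pvALoop, hc, ih]
    · by_cases hp : pos ∈ P <;>
        simp [pvALoop, hc, hp, ih, pvWC]

lemma pvWC_filterMap (P : List Int) (t : List Int) (a : Int) :
    (pvWC a t).filterMap (fun q => if q.1 ∈ P then some q.2 else none) =
      (List.range t.length).filterMap
        (fun (i : Nat) => if (a + (i : Int)) ∈ P then some (t.getD i 0) else none) := by
  induction t generalizing a with
  | nil => simp [pvWC]
  | cons x xs ih =>
    by_cases hp : a ∈ P <;>
      simp [pvWC, List.range_succ_eq_map, List.filterMap_map, hp, ih (a + 1)] <;>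
      exact List.filterMap_congr fun i _ => by
        have h2 : a + 1 + (i : Int) = a + ((i : Int) + 1) := by ring
        simp [h2]

lemma pvFMfilter (g : Int → Option Int) (l : List Int) :
    l.filterMap g = (l.filter (fun x => (g x).isSome)).filterMap g := by
  induction l with
  | nil => rfl
  | cons x xs ih =>
    cases hx : g x <;> simp [hx, ih]

lemma pvFM (g : Int → Option Int) (l₁ l₂ : List Int)
    (h₁ : l₁.Pairwise (· < ·)) (h₂ : l₂.Pairwise (· < ·))
    (h : ∀ x : Int, (x ∈ l₁ ∧ (g x).isSome) ↔ (x ∈ l₂ ∧ (g x).isSome)) :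
    l₁.filterMap g = l₂.filterMap g := by
  have hfilter : l₁.filter (fun x => (g x).isSome) = l₂.filter (fun x => (g x).isSome) := by
    have hn₁ : (l₁.filter (fun x => (g x).isSome)).Nodup :=
      List.Nodup.filter _ (h₁.imp ne_of_lt)
    have hn₂ : (l₂.filter (fun x => (g x).isSome)).Nodup :=
      List.Nodup.filter _ (h₂.imp ne_of_lt)
    have hperm : (l₁.filter (fun x => (g x).isSome)).Perm (l₂.filter (fun x => (g x).isSome)) := by
      rw [List.perm_ext_iff_of_nodup hn₁ hn₂]
      intro x
      simp only [List.mem_filter]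
      constructor
      · rintro ⟨hm, hs⟩
        exact ⟨((h x).mp ⟨hm, by simpa using hs⟩).1, hs⟩
      · rintro ⟨hm, hs⟩
        exact ⟨((h x).mpr ⟨hm, by simpa using hs⟩).1, hs⟩
    exact List.Perm.eq_of_pairwise
      (fun a b _ _ hab hba => absurd hab (not_lt.mpr hba.le))
      (List.Pairwise.filter _ h₁) (List.Pairwise.filter _ h₂) hperm
  rw [pvFMfilter g l₁, pvFMfilter g l₂, hfilter]

theorem pv_main (P : List Int) (s : String) :
    get_reference_positions_py P s = get_reference_positions_py_alt P s := by
  unfold get_reference_positions_py get_reference_positions_py_alt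
  set t : List Int := (PySem.List.enumerate s.toList 0).filterMap
    (fun p => if p.2 ≠ '-' then some p.1 else none) with ht
  set n : Nat := t.length with hn
  set S : List Int := PySem.List.sorted (PySem.Set.ofList P) (fun x => x) false with hS
  set J : List Int := (List.range n).map (fun (i : Nat) => (i : Int)) with hJ
  set g : Int → Option Int := fun p => if 0 ≤ p ∧ p < (n : Int) then PySem.List.pyGet? t p else none with hg
  set gh : Int → Option Int := fun p => if p ∈ P then g p else none with hgh
  have hmemJ : ∀ x : Int, x ∈ J ↔ 0 ≤ x ∧ x < (n : Int) := by
    intro x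
    simp only [hJ, List.mem_map, List.mem_range]
    constructor
    · rintro ⟨i, hi, rfl⟩
      constructor
      · exact Int.natCast_nonneg i
      · exact_mod_cast hi
    · rintro ⟨h0, hlt⟩
      exact ⟨x.toNat, by omega, by omega⟩
  have hmemS : ∀ x : Int, x ∈ S ↔ x ∈ P := by
    intro x
    simp [hS, PySem.List.mem_sorted, PySem.Set.mem_ofList]
  -- A's value
  rw [pvALoop_spec, pvWC_filterMap, List.nil_append]
  -- A's value rewritten as J.filterMap gh
  have hA : (List.range t.length).filterMap
      (fun (i : Nat) => if ((0:Int) + (i : Int)) ∈ P then some (t.getD i 0) else none)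
      = J.filterMap gh := by
    rw [hJ, List.filterMap_map]
    apply List.filterMap_congr
    intro i hi
    simp only [List.mem_range] at hi
    simp only [Function.comp_apply, hgh, hg, zero_add]
    by_cases hp : (i : Int) ∈ P
    · have h1 : (0:Int) ≤ (i:Int) ∧ (i:Int) < (n:Int) := ⟨Int.natCast_nonneg i, by exact_mod_cast hi⟩
      rw [if_pos hp, if_pos hp, if_pos h1, PySem.List.pyGet?_natCast,
        List.getElem?_eq_getElem hi, List.getD_eq_getElem t 0 hi]
    · rw [if_neg hp, if_neg hp]
  rw [← hn, hA]
  -- B's value rewritten as S.filterMap gh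
  have hB : S.filterMap g = S.filterMap gh := by
    apply List.filterMap_congr
    intro x hx
    have : x ∈ P := (hmemS x).mp hx
    simp [hgh, this]
  rw [hB]
  -- both index lists are strictly increasing with the same relevant members
  apply pvFM
  · rw [hJ]
    exact List.Pairwise.map _ (fun a b hab => by exact_mod_cast hab) List.pairwise_lt_range
  · rw [hS]
    exact PySem.List.sorted_ofList_pairwise_lt P
  · intro x
    have hsome : (gh x).isSome = true ↔ (x ∈ P ∧ (0 ≤ x ∧ x < (n : Int))) := by
      simp only [hgh, hg]
      by_cases hp : x ∈ P
      · by_cases hr : (0:Int) ≤ x ∧ x < (n : Int)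
        · obtain ⟨h0, hlt⟩ := hr
          rw [if_pos hp, if_pos ⟨h0, hlt⟩]
          have hsome' : PySem.List.pyGet? t x = some (t.getD x.toNat 0) := by
            rw [PySem.List.pyGet?_of_nonneg t h0, List.getElem?_eq_getElem (by omega),
              List.getD_eq_getElem t 0 (by omega)]
          simp [hsome', hp, h0, hlt]
        · rw [if_pos hp, if_neg hr]
          simp [hp, hr]
      · rw [if_neg hp]
        simp [hp]
    rw [hmemJ x, hmemS x, hsome]
    tauto

-- ===== VERDICT (by name: the statement is the Claim_ definition above) =====
theorem get_reference_positions_py_spec : Claim_equal_get_reference_positions_py := by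
  intro positions aligned_reference _
  unfold Spec_get_reference_positions_py
  exact pv_main positions aligned_reference
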